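-- pv_equiv track=rewrite | github.com/Dormailler/Algorithm | 프로그래머스/1/389478. 택배 상자 꺼내기/택배 상자 꺼내기.py | solution
-- ===== SOURCE A (Python) =====
-- def solution(n, w, num):
--     answer = 0
--     x = 0
--     y = 0
--     d = 0
--     arr = [[0 for _ in range(w)] for _ in range(n//w+1)]
--     for i in range(n):
--         arr[y][x] = i+1
--         if d == 0:
--             x += 1
--         else:
--             x -= 1
--         if x == w:
--             x -= 1
--             y += 1
--             d = 1
--         if x == -1:
--             x = 0
--             y += 1
--             d = 0
--
--     for i in range(len(arr)):
--         for j in range(w):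
--             if arr[i][j] == num:
--                 for k in range(len(arr) - i):
--                     if arr[i+k][j] != 0:
--                         answer += 1
--                 break
--     return answer
-- ===== SOURCE B (Python) =====
-- def solution(n, w, num):
--     if num < 1 or num > n:
--         return 0
--     r, c = divmod(num - 1, w)
--     if r % 2 == 1:
--         c = w - 1 - c
--     last_r = (n + w - 1) // w - 1          # index of the last row that holds any box
--     rem = n - last_r * w                   # boxes in that last row
--     if last_r % 2 == 0:
--         top = 1 if c < rem else 0
--     else:
--         top = 1 if c >= w - rem else 0
--     return (last_r - r) + top
-- ===== Notes on version B (the rewrite author's own statement) =====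
-- stated objective: faster
-- what changed: B replaces A's O(n) construction of the whole snake grid and its scan by O(1) arithmetic: the box's row/column from divmod(num-1,w) and the index of the last occupied row give the count directly.
import Mathlib
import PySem

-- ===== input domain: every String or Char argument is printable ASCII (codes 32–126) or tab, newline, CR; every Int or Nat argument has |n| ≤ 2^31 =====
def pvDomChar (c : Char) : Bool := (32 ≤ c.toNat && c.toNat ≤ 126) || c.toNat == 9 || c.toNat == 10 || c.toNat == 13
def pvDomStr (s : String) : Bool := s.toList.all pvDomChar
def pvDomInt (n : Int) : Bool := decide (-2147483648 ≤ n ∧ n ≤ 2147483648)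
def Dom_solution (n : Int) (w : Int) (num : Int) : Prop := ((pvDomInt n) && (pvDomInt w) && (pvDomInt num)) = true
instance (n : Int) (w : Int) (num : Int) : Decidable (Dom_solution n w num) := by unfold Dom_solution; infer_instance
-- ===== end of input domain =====

-- B replaces A's O(n) construction and scan of the whole snake grid by O(1) arithmetic
-- on the box's row/column and the index of the last occupied row.

-- ===== PORT A =====
-- the mutable grid is an Array of Arrays (Python's list of lists with O(1) indexing)
-- arr[y][x] = v  (indices are nonnegative and in range on every input Pre_ admits)
def pvSet2A (arr : Array (Array Int)) (y x v : Int) : Array (Array Int) :=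
  arr.modify y.toNat (fun row => row.setIfInBounds x.toNat v)

-- arr[i][j]  (indices are nonnegative and in range on every input Pre_ admits)
def pvGet2A (arr : Array (Array Int)) (i j : Int) : Int :=
  ((arr[i.toNat]?.getD #[])[j.toNat]?).getD 0

-- one iteration of A's building loop: write i+1 at (y,x), then move x/y/d
def solutionStep (w : Int) (st : (Int × Int × Int) × Array (Array Int)) (i : Int) :
    (Int × Int × Int) × Array (Array Int) :=
  let x := st.1.1
  let y := st.1.2.1
  let d := st.1.2.2
  let arr := pvSet2A st.2 y x (i + 1)
  let x := if d == 0 then x + 1 else x - 1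
  let p := if x == w then (x - 1, y + 1, (1 : Int)) else (x, y, d)
  let q := if p.1 == -1 then ((0 : Int), p.2.1 + 1, (0 : Int)) else p
  (q, arr)

def solution (n : Int) (w : Int) (num : Int) : Int :=
  let arr0 := ((PySem.List.pyRange 0 (PySem.Int.floordiv n w + 1) 1).map
      (fun _ => ((PySem.List.pyRange 0 w 1).map (fun _ => (0 : Int))).toArray)).toArray
  let arr := ((PySem.List.pyRange 0 n 1).foldl (solutionStep w) ((0, 0, 0), arr0)).2
  (PySem.List.pyRange 0 (arr.size : Int) 1).foldl (fun answer i =>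
      match (PySem.List.pyRange 0 w 1).find? (fun j => pvGet2A arr i j == num) with
      | some j =>
          (PySem.List.pyRange 0 ((arr.size : Int) - i) 1).foldl
            (fun a k => if pvGet2A arr (i + k) j != 0 then a + 1 else a) answer
      | none => answer) 0

-- ===== PORT B =====
def solution_alt (n : Int) (w : Int) (num : Int) : Int :=
  if num < 1 || n < num then 0
  else
    let r := PySem.Int.floordiv (num - 1) w
    let c0 := PySem.Int.mod (num - 1) w
    let c := if PySem.Int.mod r 2 == 1 then w - 1 - c0 else c0
    let lastR := PySem.Int.floordiv (n + w - 1) w - 1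
    let rem := n - lastR * w
    let top : Int := if PySem.Int.mod lastR 2 == 0
      then (if c < rem then 1 else 0)
      else (if w - rem ≤ c then 1 else 0)
    lastR - r + top

-- ===== PRECONDITION & SPEC =====
-- Pre_ excludes exactly the inputs on which A raises: w = 0 (ZeroDivisionError in n//w)
-- and w < 0 with n > 0 (IndexError: the rows built by range(w) are empty).
def Pre_solution (n : Int) (w : Int) (num : Int) : Prop := 1 ≤ w ∨ (w ≤ -1 ∧ n ≤ 0)
instance (n : Int) (w : Int) (num : Int) : Decidable (Pre_solution n w num) := by
  unfold Pre_solution; infer_instance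
def pvWitness_solution : Int × Int × Int := (5, 2, 3)

def Spec_solution (n : Int) (w : Int) (num : Int) (out : Int) : Prop := out = solution_alt n w num
instance (n : Int) (w : Int) (num : Int) (out : Int) : Decidable (Spec_solution n w num out) := by unfold Spec_solution; infer_instance

-- ===== CLAIM (what is proved, stated in full; the proofs are below) =====
def Claim_equal_solution : Prop := ∀ (n : Int) (w : Int) (num : Int), Dom_solution n w num → Pre_solution n w num → Spec_solution n w num (solution n w num)

-- ===== LEMMAS AND PROOFS =====

-- list-level images of the port's array operations (proof-side only)
def pvSet2 (arr : List (List Int)) (y x v : Int) : List (List Int) :=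
  arr.modify y.toNat (fun row => row.set x.toNat v)

def pvGet2 (arr : List (List Int)) (i j : Int) : Int :=
  ((arr[i.toNat]?.getD [])[j.toNat]?).getD 0

def stepL (w : Int) (st : (Int × Int × Int) × List (List Int)) (i : Int) :
    (Int × Int × Int) × List (List Int) :=
  let x := st.1.1
  let y := st.1.2.1
  let d := st.1.2.2
  let arr := pvSet2 st.2 y x (i + 1)
  let x := if d == 0 then x + 1 else x - 1
  let p := if x == w then (x - 1, y + 1, (1 : Int)) else (x, y, d)
  let q := if p.1 == -1 then ((0 : Int), p.2.1 + 1, (0 : Int)) else p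
  (q, arr)

def gArr (l : List (List Int)) : Array (Array Int) := (l.map List.toArray).toArray

lemma pvSet2A_g (l : List (List Int)) (y x v : Int) :
    pvSet2A (gArr l) y x v = gArr (pvSet2 l y x v) := by
  unfold pvSet2A pvSet2 gArr
  rw [← Array.toList_inj]
  rw [Array.toList_modify]
  apply List.ext_getElem
  · simp [List.length_modify]
  · intro q h1 h2
    have hq2 : q < l.length := by simpa [List.length_modify] using h1
    rw [List.getElem_modify]
    rw [List.getElem_map (h := by simpa using hq2)]
    rw [List.getElem_map (h := by simpa [List.length_modify] using hq2)]
    rw [List.getElem_modify]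
    by_cases hq : y.toNat = q
    · rw [if_pos hq, if_pos hq]
      rw [← Array.toList_inj, Array.toList_setIfInBounds]
    · rw [if_neg hq, if_neg hq]

lemma pvGet2A_g (l : List (List Int)) (i j : Int) :
    pvGet2A (gArr l) i j = pvGet2 l i j := by
  unfold pvGet2A pvGet2 gArr
  simp only [List.getElem?_toArray, List.getElem?_map]
  cases l[i.toNat]? <;> simp

lemma size_g (l : List (List Int)) : (gArr l).size = l.length := by
  simp [gArr]

lemma stepA_g (w : Int) (t : Int × Int × Int) (l : List (List Int)) (i : Int) :
    solutionStep w (t, gArr l) i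
      = ((stepL w (t, l) i).1, gArr (stepL w (t, l) i).2) := by
  simp only [solutionStep, stepL, pvSet2A_g]

lemma foldl_gA (w : Int) (xs : List Int) :
    ∀ (t : Int × Int × Int) (l : List (List Int)),
    xs.foldl (solutionStep w) (t, gArr l)
      = ((xs.foldl (stepL w) (t, l)).1, gArr (xs.foldl (stepL w) (t, l)).2) := by
  induction xs with
  | nil => intro t l; rfl
  | cons x xs ih =>
    intro t l
    rw [List.foldl_cons, List.foldl_cons, stepA_g]
    exact ih (stepL w (t, l) x).1 (stepL w (t, l) x).2

-- the column in which box number (idx+1) sits in row q of the snake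
def colN (W q c : Nat) : Nat := if q % 2 = 0 then c else W - 1 - c
-- linear index (box number - 1) of cell (q,c)
def idxN (W q c : Nat) : Nat := q * W + colN W q c
-- content of cell (q,c) after placing boxes 1..i
def valN (W i q c : Nat) : Int := if idxN W q c < i then (idxN W q c : Int) + 1 else 0
def rowSpec (W i q : Nat) : List Int := (List.range W).map (valN W i q)
def arrSpec (W R i : Nat) : List (List Int) := (List.range R).map (rowSpec W i)

lemma colN_lt {W q c : Nat} (hW : 0 < W) (hc : c < W) : colN W q c < W := by
  unfold colN; split <;> omega

lemma colN_colN {W q c : Nat} (hc : c < W) : colN W q (colN W q c) = c := by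
  unfold colN; split <;> omega

lemma divmod_uniq {W q s i : Nat} (hW : 0 < W) (hs : s < W) (h : q * W + s = i) :
    i / W = q ∧ i % W = s := by
  subst h
  rw [mul_comm q W]
  constructor
  · rw [Nat.mul_add_div hW, Nat.div_eq_of_lt hs]; omega
  · rw [Nat.mul_add_mod, Nat.mod_eq_of_lt hs]

lemma idxN_self {W i : Nat} (hW : 0 < W) :
    idxN W (i / W) (colN W (i / W) (i % W)) = i := by
  have h2 : i % W < W := Nat.mod_lt _ hW
  have h3 := Nat.div_add_mod i W
  have h4 : i / W * W = W * (i / W) := Nat.mul_comm _ _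
  unfold idxN colN
  split <;> omega

lemma idxN_div_mod {W q c : Nat} (hW : 0 < W) (hc : c < W) :
    idxN W q c / W = q ∧ idxN W q c % W = colN W q c :=
  divmod_uniq hW (colN_lt hW hc) rfl

lemma idxN_eq_iff {W q c i : Nat} (hW : 0 < W) (hc : c < W) :
    idxN W q c = i ↔ q = i / W ∧ c = colN W (i / W) (i % W) := by
  constructor
  · intro h
    obtain ⟨hd, hm⟩ := idxN_div_mod (q := q) (c := c) hW hc
    rw [h] at hd hm
    refine ⟨hd.symm, ?_⟩
    rw [hd, hm, colN_colN hc]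
  · rintro ⟨rfl, rfl⟩
    exact idxN_self hW

lemma arrSpec_length {W R i : Nat} : (arrSpec W R i).length = R := by
  simp [arrSpec]

-- counting a prefix predicate over List.range
lemma countP_range_prefix {p : Nat → Bool} (m : Nat) : ∀ K : Nat, K ≤ m →
    (∀ k < m, (p k = true ↔ k < K)) → (List.range m).countP p = K := by
  induction m with
  | zero =>
    intro K hK _
    simp only [List.range_zero, List.countP_nil]
    omega
  | succ m ih =>
    intro K hK h
    rw [List.range_succ, List.countP_append]
    by_cases hKm : K ≤ m
    · have hpm : p m = false := by
        by_contra hb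
        have := (h m (by omega)).mp (by simpa using hb)
        omega
      rw [ih K hKm (fun k hk => h k (by omega))]
      simp [hpm]
    · have hKe : K = m + 1 := by omega
      have hpm : p m = true := (h m (by omega)).mpr (by omega)
      have hm : (List.range m).countP p = m := by
        apply ih m (by omega)
        intro k hk
        rw [h k (by omega)]
        omega
      rw [hm]
      simp [hpm, hKe]

-- find? over range 0..W-1 returns the first index where p holds
lemma find?_pyRange_first {W : Nat} {p : Int → Bool} {c : Nat} (hc : c < W)
    (hp : p (c : Int) = true) (hprev : ∀ j : Nat, j < c → p (j : Int) = false) :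
    (PySem.List.pyRange 0 (W : Int) 1).find? p = some (c : Int) := by
  rw [PySem.List.pyRange_one_append 0 (c : Int) (W : Int) (by positivity) (by exact_mod_cast hc.le)]
  rw [List.find?_append]
  have h1 : (PySem.List.pyRange 0 (c : Int) 1).find? p = none := by
    rw [List.find?_eq_none]
    intro x hx
    rw [PySem.List.mem_pyRange_one] at hx
    obtain ⟨hx0, hxc⟩ := hx
    have : x = ((x.toNat : Nat) : Int) := by omega
    rw [this, hprev x.toNat (by omega)]
    simp
  rw [h1, PySem.List.pyRange_one_cons (by exact_mod_cast hc)]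
  simp [hp]

lemma find?_pyRange_none {W : Nat} {p : Int → Bool}
    (h : ∀ j : Nat, j < W → p (j : Int) = false) :
    (PySem.List.pyRange 0 (W : Int) 1).find? p = none := by
  rw [List.find?_eq_none]
  intro x hx
  rw [PySem.List.mem_pyRange_one] at hx
  obtain ⟨hx0, hxc⟩ := hx
  have : x = ((x.toNat : Nat) : Int) := by omega
  rw [this, h x.toNat (by omega)]
  simp

lemma pvGet2_arrSpec {W R i q c : Nat} (hq : q < R) (hc : c < W) :
    pvGet2 (arrSpec W R i) (q : Int) (c : Int) = valN W i q c := by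
  unfold pvGet2 arrSpec rowSpec
  simp [hq, hc]

lemma valN_succ_ne {W q c i : Nat} (hW : 0 < W) (hc : c < W)
    (hne : ¬(q = i / W ∧ c = colN W (i / W) (i % W))) :
    valN W (i + 1) q c = valN W i q c := by
  have h : idxN W q c ≠ i := fun h => hne ((idxN_eq_iff hW hc).mp h)
  unfold valN
  by_cases hlt : idxN W q c < i
  · rw [if_pos (by omega), if_pos hlt]
  · rw [if_neg (by omega), if_neg hlt]

-- the write of step i turns arrSpec i into arrSpec (i+1)
lemma pvSet2_arrSpec {W R i : Nat} (hW : 0 < W) (hq : i / W < R) :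
    pvSet2 (arrSpec W R i) ((i / W : Nat) : Int) ((colN W (i / W) (i % W) : Nat) : Int)
      ((i : Int) + 1) = arrSpec W R (i + 1) := by
  have hcx : colN W (i / W) (i % W) < W := colN_lt hW (Nat.mod_lt _ hW)
  unfold pvSet2
  simp only [Int.toNat_natCast]
  apply List.ext_getElem
  · simp [arrSpec, List.length_modify]
  · intro q' h1 h2
    have hq' : q' < R := by simpa [arrSpec, List.length_modify] using h1
    rw [List.getElem_modify]
    by_cases hqq : i / W = q'
    · subst hqq
      rw [if_pos rfl]
      have harr : ∀ j (hj : i / W < R), (arrSpec W R j)[i / W]'(by simp [arrSpec]; exact hj)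
          = rowSpec W j (i / W) := by
        intro j hj; simp [arrSpec]
      rw [harr _ hq, harr _ hq]
      apply List.ext_getElem
      · simp [rowSpec]
      · intro c hc1 hc2
        have hc : c < W := by simpa [rowSpec] using hc1
        rw [List.getElem_set]
        have hrw : ∀ j, (rowSpec W j (i / W))[c]'(by simp [rowSpec]; exact hc) = valN W j (i / W) c := by
          intro j; simp [rowSpec]
        by_cases hcc : colN W (i / W) (i % W) = c
        · rw [if_pos hcc, hrw]
          subst hcc
          unfold valN
          rw [idxN_self hW, if_pos (by omega)]
        · rw [if_neg hcc, hrw, hrw]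
          exact (valN_succ_ne hW hc (fun h => hcc h.2.symm)).symm
    · rw [if_neg hqq]
      have ha : ∀ j, (arrSpec W R j)[q']'(by simp [arrSpec]; exact hq') = rowSpec W j q' := by
        intro j; simp [arrSpec]
      rw [ha, ha]
      apply List.ext_getElem
      · simp [rowSpec]
      · intro c hc1 hc2
        have hc : c < W := by simpa [rowSpec] using hc1
        have hrw : ∀ j, (rowSpec W j q')[c]'(by simp [rowSpec]; exact hc) = valN W j q' c := by
          intro j; simp [rowSpec]
        rw [hrw, hrw]
        exact (valN_succ_ne hW hc (fun h => hqq (h.1.symm))).symm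

-- state of A's loop after i iterations
lemma loop_inv {w : Int} (hw : 1 ≤ w) {N R : Nat} (hR : N / w.toNat < R) :
    ∀ i : Nat, i ≤ N →
    (PySem.List.pyRange 0 (i : Int) 1).foldl (stepL w) ((0, 0, 0), arrSpec w.toNat R 0)
      = ((((colN w.toNat (i / w.toNat) (i % w.toNat) : Nat) : Int),
          (((i / w.toNat) : Nat) : Int), (((i / w.toNat % 2) : Nat) : Int)),
         arrSpec w.toNat R i) := by
  intro i hi
  induction i with
  | zero =>
    rw [PySem.List.pyRange_one_eq_nil (by omega)]
    simp [colN]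
  | succ i ih =>
    have hW : 0 < w.toNat := by omega
    have hwW : ((w.toNat : Nat) : Int) = w := Int.toNat_of_nonneg (by omega)
    have hiN : i < N := by omega
    have hqR : i / w.toNat < R := lt_of_le_of_lt (Nat.div_le_div_right hiN.le) hR
    rw [show ((i + 1 : Nat) : Int) = (i : Int) + 1 by push_cast; ring]
    rw [PySem.List.pyRange_one_succ_right (by positivity), List.foldl_append]
    rw [ih (by omega)]
    set W := w.toNat with hWdef
    set q := i / W with hq
    set rem := i % W with hrem
    have hremW : rem < W := Nat.mod_lt _ hW
    have hdm : W * q + rem = i := Nat.div_add_mod i W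
    have hmc : W * q = q * W := Nat.mul_comm _ _
    have hmc2 : (q + 1) * W = q * W + W := by ring
    simp only [List.foldl_cons, List.foldl_nil]
    unfold stepL
    simp only
    rw [pvSet2_arrSpec hW hqR]
    by_cases hq2 : q % 2 = 0
    · have hd0 : (((q % 2 : Nat) : Int) == 0) = true := by simp [hq2]
      rw [hd0]
      simp only [if_true]
      have hcol : colN W q rem = rem := by simp [colN, hq2]
      rw [hcol]
      by_cases hlast : rem + 1 = W
      · have hdm1 : (i + 1) / W = q + 1 ∧ (i + 1) % W = 0 :=
          divmod_uniq hW hW (by omega)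
        have hx : ((((rem : Nat) : Int) + 1) == w) = true := by
          rw [← hwW, beq_iff_eq]; omega
        rw [hx]
        simp only [if_true]
        have hx2 : ((((rem : Nat) : Int) + 1 - 1) == (-1 : Int)) = false := by
          rw [beq_eq_false_iff_ne]; omega
        rw [hx2]
        simp only [Bool.false_eq_true, if_false]
        rw [hdm1.1, hdm1.2]
        have hcol2 : colN W (q + 1) 0 = W - 1 := by
          simp [colN]; omega
        rw [hcol2]
        have hpar : (q + 1) % 2 = 1 := by omega
        rw [hpar]
        refine Prod.ext (Prod.ext ?_ (Prod.ext ?_ ?_)) rfl <;> push_cast <;> omega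
      · have hdm1 : (i + 1) / W = q ∧ (i + 1) % W = rem + 1 :=
          divmod_uniq hW (by omega) (by omega)
        have hx : ((((rem : Nat) : Int) + 1) == w) = false := by
          rw [← hwW, beq_eq_false_iff_ne]; omega
        rw [hx]
        simp only [Bool.false_eq_true, if_false]
        have hx2 : ((((rem : Nat) : Int) + 1) == (-1 : Int)) = false := by
          rw [beq_eq_false_iff_ne]; omega
        rw [hx2]
        simp only [Bool.false_eq_true, if_false]
        rw [hdm1.1, hdm1.2]
        have hcol2 : colN W q (rem + 1) = rem + 1 := by simp [colN, hq2]
        rw [hcol2, hq2]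
        refine Prod.ext (Prod.ext ?_ (Prod.ext ?_ ?_)) rfl <;> push_cast <;> omega
    · have hq21 : q % 2 = 1 := by omega
      have hd0 : (((q % 2 : Nat) : Int) == 0) = false := by simp [hq21]
      rw [hd0]
      simp only [Bool.false_eq_true, if_false]
      have hcol : colN W q rem = W - 1 - rem := by simp [colN, hq21]
      rw [hcol]
      have hx : ((((W - 1 - rem : Nat) : Int) - 1) == w) = false := by
        rw [← hwW]; simp; omega
      rw [hx]
      simp only [Bool.false_eq_true, if_false]
      by_cases hlast : rem + 1 = W
      · have hdm1 : (i + 1) / W = q + 1 ∧ (i + 1) % W = 0 :=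
          divmod_uniq hW hW (by omega)
        have hx2 : ((((W - 1 - rem : Nat) : Int) - 1) == (-1 : Int)) = true := by
          rw [beq_iff_eq]; omega
        rw [hx2]
        simp only [if_true]
        rw [hdm1.1, hdm1.2]
        have hcol2 : colN W (q + 1) 0 = 0 := by simp [colN]; omega
        rw [hcol2]
        have hpar : (q + 1) % 2 = 0 := by omega
        rw [hpar]
        refine Prod.ext (Prod.ext ?_ (Prod.ext ?_ ?_)) rfl <;> push_cast <;> omega
      · have hdm1 : (i + 1) / W = q ∧ (i + 1) % W = rem + 1 :=
          divmod_uniq hW (by omega) (by omega)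
        have hx2 : ((((W - 1 - rem : Nat) : Int) - 1) == (-1 : Int)) = false := by
          rw [beq_eq_false_iff_ne]; omega
        rw [hx2]
        simp only [Bool.false_eq_true, if_false]
        rw [hdm1.1, hdm1.2]
        have hcol2 : colN W q (rem + 1) = W - 1 - (rem + 1) := by simp [colN, hq21]
        rw [hcol2, hq21]
        refine Prod.ext (Prod.ext ?_ (Prod.ext ?_ ?_)) rfl <;> push_cast <;> omega

-- the contribution of row i to A's answer
def rowContrib (arr : List (List Int)) (W : Nat) (num : Int) (L i : Int) : Int :=
  match (PySem.List.pyRange 0 (W : Int) 1).find? (fun j => pvGet2 arr i j == num) with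
  | some j => ((PySem.List.pyRange 0 (L - i) 1).countP
      (fun k => pvGet2 arr (i + k) j != 0) : Int)
  | none => 0

-- A's answer loop is the sum of the row contributions
lemma fold_eq_sum (arr : List (List Int)) (W : Nat) (num : Int) (L : Int) :
    (PySem.List.pyRange 0 L 1).foldl (fun answer i =>
      match (PySem.List.pyRange 0 (W : Int) 1).find? (fun j => pvGet2 arr i j == num) with
      | some j =>
          (PySem.List.pyRange 0 (L - i) 1).foldl
            (fun a k => if pvGet2 arr (i + k) j != 0 then a + 1 else a) answer
      | none => answer) 0
    = ((PySem.List.pyRange 0 L 1).map (rowContrib arr W num L)).sum := by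
  rw [List.foldl_ext _ (fun (answer i : Int) => answer + rowContrib arr W num L i) 0 ?_]
  · rw [PySem.List.foldl_add, zero_add]
  · intro a i _
    unfold rowContrib
    cases hf : (PySem.List.pyRange 0 (W : Int) 1).find? (fun j => pvGet2 arr i j == num) with
    | none => simp [hf]
    | some j => simp only [hf]; rw [PySem.List.foldl_count_if]

-- a zero cell has only zero cells below it in its column
lemma count_below_zero {W R N q c : Nat} (hW : 0 < W) (hqR : q < R) (hcW : c < W)
    (hz : N ≤ idxN W q c) :
    (PySem.List.pyRange 0 ((R : Int) - (q : Int)) 1).countP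
      (fun k => pvGet2 (arrSpec W R N) ((q : Int) + k) (c : Int) != 0) = 0 := by
  rw [List.countP_eq_zero]
  intro k hk
  rw [PySem.List.mem_pyRange_one] at hk
  obtain ⟨kk, rfl⟩ : ∃ kk : Nat, k = (kk : Int) := ⟨k.toNat, by omega⟩
  have hkR : q + kk < R := by omega
  rw [show ((q : Int) + (kk : Int)) = ((q + kk : Nat) : Int) by push_cast; ring]
  rw [pvGet2_arrSpec hkR hcW]
  have hzero : valN W N (q + kk) c = 0 := by
    have hb1 : colN W q c < W := colN_lt hW hcW
    have hb2 : (q + kk) * W = q * W + kk * W := by ring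
    rcases Nat.eq_zero_or_pos kk with hkk | hkk
    · subst hkk
      unfold valN
      rw [if_neg (by simp only [Nat.add_zero]; omega)]
    · have hb3 : W ≤ kk * W := Nat.le_mul_of_pos_left _ hkk
      unfold valN
      rw [if_neg ?_]
      unfold idxN at hz ⊢
      omega
  rw [hzero]
  simp

-- when num < 1 or num > n, A's answer is 0
lemma phase2_zero {W R N : Nat} (hW : 0 < W) (num n : Int) (hnum : num < 1 ∨ n < num)
    (hN : (N : Int) ≤ n ∨ N = 0) :
    (PySem.List.pyRange 0 ((R : Nat) : Int) 1).foldl (fun (answer i : Int) =>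
      match (PySem.List.pyRange 0 (W : Int) 1).find? (fun j => pvGet2 (arrSpec W R N) i j == num) with
      | some j =>
          (PySem.List.pyRange 0 (((R : Nat) : Int) - i) 1).foldl
            (fun a k => if pvGet2 (arrSpec W R N) (i + k) j != 0 then a + 1 else a) answer
      | none => answer) (0 : Int) = 0 := by
  refine (fold_eq_sum (arrSpec W R N) W num ((R : Nat) : Int)).trans ?_
  apply List.sum_eq_zero
  intro x hx
  rw [List.mem_map] at hx
  obtain ⟨i, hi, rfl⟩ := hx
  rw [PySem.List.mem_pyRange_one] at hi
  obtain ⟨q, rfl⟩ : ∃ q : Nat, i = (q : Int) := ⟨i.toNat, by omega⟩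
  have hqR : q < R := by omega
  unfold rowContrib
  cases hf : (PySem.List.pyRange 0 (W : Int) 1).find? (fun j => pvGet2 (arrSpec W R N) (q : Int) j == num) with
  | none => rfl
  | some j =>
    have hjm := List.mem_of_find?_eq_some hf
    rw [PySem.List.mem_pyRange_one] at hjm
    obtain ⟨c, rfl⟩ : ∃ c : Nat, j = (c : Int) := ⟨j.toNat, by omega⟩
    have hcW : c < W := by omega
    have hp := List.find?_some hf
    rw [beq_iff_eq, pvGet2_arrSpec hqR hcW] at hp
    have hz : N ≤ idxN W q c := by
      unfold valN at hp
      split at hp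
      · exfalso; omega
      · omega
    simp [count_below_zero hW hqR hcW hz]

-- index of the last row holding any box, the last-row bit, and B's count
def lastRN (W N : Nat) : Nat := (N - 1) / W
def topN (W N c : Nat) : Nat := if idxN W (lastRN W N) c < N then 1 else 0
def KN (W N M : Nat) : Nat :=
  (lastRN W N - M / W) + topN W N (colN W (M / W) (M % W))

lemma row_no_match {W R N M q : Nat} (hW : 0 < W) (hqR : q < R)
    (hqr : q ≠ M / W) :
    (PySem.List.pyRange 0 (W : Int) 1).find?
      (fun j => pvGet2 (arrSpec W R N) (q : Int) j == ((M : Int) + 1)) = none := by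
  apply find?_pyRange_none
  intro c hcW
  rw [beq_eq_false_iff_ne, pvGet2_arrSpec hqR hcW]
  unfold valN
  by_cases h : idxN W q c < N
  · rw [if_pos h]
    intro hEq
    have hdm : idxN W q c = M := by omega
    have hd := (idxN_div_mod (q := q) (c := c) hW hcW).1
    rw [hdm] at hd
    exact hqr hd.symm
  · rw [if_neg h]
    intro hEq
    omega

lemma row_match {W R N M : Nat} (hW : 0 < W) (hrR : M / W < R) (hMN : M < N) :
    (PySem.List.pyRange 0 (W : Int) 1).find?
      (fun j => pvGet2 (arrSpec W R N) ((M / W : Nat) : Int) j == ((M : Int) + 1))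
      = some ((colN W (M / W) (M % W) : Nat) : Int) := by
  have hcx : colN W (M / W) (M % W) < W := colN_lt hW (Nat.mod_lt _ hW)
  apply find?_pyRange_first hcx
  · rw [beq_iff_eq, pvGet2_arrSpec hrR hcx]
    unfold valN
    rw [idxN_self hW, if_pos hMN]
  · intro j hj
    have hjW : j < W := lt_trans hj hcx
    rw [beq_eq_false_iff_ne, pvGet2_arrSpec hrR hjW]
    unfold valN
    by_cases h : idxN W (M / W) j < N
    · rw [if_pos h]
      intro hEq
      have hdm : idxN W (M / W) j = M := by omega
      have := ((idxN_eq_iff hW hjW).mp hdm).2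
      omega
    · rw [if_neg h]
      intro hEq
      omega

lemma row_count {W R N M : Nat} (hW : 0 < W) (hMN : M < N) (hR : R = N / W + 1) :
    (PySem.List.pyRange 0 ((R : Int) - ((M / W : Nat) : Int)) 1).countP
      (fun k => pvGet2 (arrSpec W R N) (((M / W : Nat) : Int) + k)
        ((colN W (M / W) (M % W) : Nat) : Int) != 0) = KN W N M := by
  have hcx : colN W (M / W) (M % W) < W := colN_lt hW (Nat.mod_lt _ hW)
  have hrlast : M / W ≤ lastRN W N := Nat.div_le_div_right (by omega)
  have hlastR : lastRN W N < R := by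
    have h1 : (N - 1) / W ≤ N / W := Nat.div_le_div_right (by omega)
    unfold lastRN
    omega
  have hrR : M / W < R := lt_of_le_of_lt hrlast hlastR
  have hb1 : lastRN W N * W ≤ N - 1 := Nat.div_mul_le_self _ _
  have hb2 : N - 1 < lastRN W N * W + W := by
    have h1 := Nat.div_add_mod (N - 1) W
    have h2 : (N - 1) % W < W := Nat.mod_lt _ hW
    have h3 : W * ((N - 1) / W) = ((N - 1) / W) * W := Nat.mul_comm _ _
    unfold lastRN
    omega
  rw [show ((R : Int) - ((M / W : Nat) : Int)) = ((R - M / W : Nat) : Int) by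
    rw [Nat.cast_sub hrR.le]]
  rw [PySem.List.pyRange_one]
  simp only [sub_zero, Int.toNat_natCast]
  rw [List.countP_map]
  apply countP_range_prefix
  · unfold KN topN
    split <;> omega
  · intro k hk
    have hkR : M / W + k < R := by omega
    simp only [Function.comp_apply]
    rw [show ((M / W : Nat) : Int) + (0 + (k : Nat)) = ((M / W + k : Nat) : Int) by push_cast; ring]
    rw [pvGet2_arrSpec hkR hcx]
    rw [bne_iff_ne]
    have hval : valN W N (M / W + k) (colN W (M / W) (M % W)) ≠ 0 ↔
        idxN W (M / W + k) (colN W (M / W) (M % W)) < N := by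
      unfold valN
      by_cases h : idxN W (M / W + k) (colN W (M / W) (M % W)) < N
      · rw [if_pos h]
        constructor
        · intro _; exact h
        · intro _
          have : (0 : Int) ≤ (idxN W (M / W + k) (colN W (M / W) (M % W)) : Int) := by positivity
          omega
      · rw [if_neg h]
        simp [h]
    rw [hval]
    have hcol : colN W (M / W + k) (colN W (M / W) (M % W)) < W := colN_lt hW hcx
    rcases Nat.lt_trichotomy k (lastRN W N - M / W) with hc | hc | hc
    · -- a full row strictly above the last occupied row
      have hmul : (M / W + k + 1) * W ≤ lastRN W N * W :=
        Nat.mul_le_mul_right _ (by omega)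
      have he : (M / W + k + 1) * W = (M / W + k) * W + W := by ring
      unfold idxN
      constructor
      · intro _; unfold KN; omega
      · intro _; omega
    · -- the last occupied row itself
      have hq' : M / W + k = lastRN W N := by omega
      rw [hq']
      unfold KN topN
      split <;> omega
    · -- rows below the last occupied row are empty there
      have hmul : lastRN W N * W + W ≤ (M / W + k) * W := by
        have h1 : (lastRN W N + 1) * W ≤ (M / W + k) * W :=
          Nat.mul_le_mul_right _ (by omega)
        have h2 : (lastRN W N + 1) * W = lastRN W N * W + W := by ring
        omega
      unfold idxN
      constructor
      · intro h; omega
      · intro h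
        unfold KN topN at h
        split at h <;> omega

-- when num = M+1 with M < N, A's answer is exactly KN
lemma phase2_valid {W R N M : Nat} (hW : 0 < W) (hMN : M < N) (hR : R = N / W + 1) :
    (PySem.List.pyRange 0 ((R : Nat) : Int) 1).foldl (fun (answer i : Int) =>
      match (PySem.List.pyRange 0 (W : Int) 1).find?
          (fun j => pvGet2 (arrSpec W R N) i j == ((M : Int) + 1)) with
      | some j =>
          (PySem.List.pyRange 0 (((R : Nat) : Int) - i) 1).foldl
            (fun a k => if pvGet2 (arrSpec W R N) (i + k) j != 0 then a + 1 else a) answer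
      | none => answer) (0 : Int) = (KN W N M : Int) := by
  refine (fold_eq_sum (arrSpec W R N) W ((M : Int) + 1) ((R : Nat) : Int)).trans ?_
  have hrlast : M / W ≤ lastRN W N := Nat.div_le_div_right (by omega)
  have hlastR : lastRN W N < R := by
    have h1 : (N - 1) / W ≤ N / W := Nat.div_le_div_right (by omega)
    unfold lastRN
    omega
  have hrR : M / W < R := lt_of_le_of_lt hrlast hlastR
  rw [PySem.List.pyRange_one_append 0 ((M / W : Nat) : Int) ((R : Nat) : Int)
    (by positivity) (by exact_mod_cast hrR.le)]
  rw [PySem.List.pyRange_one_append ((M / W : Nat) : Int) (((M / W : Nat) : Int) + 1)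
    ((R : Nat) : Int) (by omega) (by omega)]
  rw [PySem.List.pyRange_one_singleton]
  rw [List.map_append, List.map_append, List.sum_append, List.sum_append]
  have hzero1 : ((PySem.List.pyRange 0 ((M / W : Nat) : Int) 1).map
      (rowContrib (arrSpec W R N) W ((M : Int) + 1) ((R : Nat) : Int))).sum = 0 := by
    apply List.sum_eq_zero
    intro x hx
    rw [List.mem_map] at hx
    obtain ⟨i, hi, rfl⟩ := hx
    rw [PySem.List.mem_pyRange_one] at hi
    obtain ⟨q, rfl⟩ : ∃ q : Nat, i = (q : Int) := ⟨i.toNat, by omega⟩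
    unfold rowContrib
    rw [row_no_match hW (by omega) (by omega)]
  have hzero2 : ((PySem.List.pyRange (((M / W : Nat) : Int) + 1) ((R : Nat) : Int) 1).map
      (rowContrib (arrSpec W R N) W ((M : Int) + 1) ((R : Nat) : Int))).sum = 0 := by
    apply List.sum_eq_zero
    intro x hx
    rw [List.mem_map] at hx
    obtain ⟨i, hi, rfl⟩ := hx
    rw [PySem.List.mem_pyRange_one] at hi
    have h0 : (0 : Int) ≤ ((M / W : Nat) : Int) := by positivity
    obtain ⟨q, rfl⟩ : ∃ q : Nat, i = (q : Int) := ⟨i.toNat, by omega⟩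
    unfold rowContrib
    rw [row_no_match hW (by omega) (by omega)]
  rw [hzero1, hzero2]
  have hmid : rowContrib (arrSpec W R N) W ((M : Int) + 1) ((R : Nat) : Int)
      ((M / W : Nat) : Int) = (KN W N M : Int) := by
    unfold rowContrib
    rw [row_match hW hrR hMN]
    rw [show (((R : Nat) : Int) - ((M / W : Nat) : Int)) = ((R : Int) - ((M / W : Nat) : Int)) from rfl]
    exact congrArg _ (row_count hW hMN hR)
  simp only [List.map_cons, List.map_nil, List.sum_cons, List.sum_nil, add_zero, zero_add]
  exact hmid

-- B returns 0 outside 1..n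
lemma alt_invalid (n w num : Int) (h : num < 1 ∨ n < num) : solution_alt n w num = 0 := by
  simp only [solution_alt]
  rw [if_pos (by simp only [Bool.or_eq_true, decide_eq_true_eq]; omega)]

-- B's arithmetic equals KN on the valid inputs
lemma alt_valid {W N M : Nat} (hW : 0 < W) (hMN : M < N) :
    solution_alt ((N : Nat) : Int) ((W : Nat) : Int) (((M : Nat) : Int) + 1) = (KN W N M : Int) := by
  simp only [solution_alt]
  rw [if_neg (by simp only [Bool.or_eq_true, decide_eq_true_eq]; omega)]
  rw [show ((M : Int) + 1 - 1) = ((M : Nat) : Int) by ring]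
  rw [show ((N : Int) + (W : Int) - 1) = ((N + W - 1 : Nat) : Int) by
    push_cast [Nat.cast_sub (by omega : 1 ≤ N + W)]; ring]
  rw [PySem.Int.floordiv_natCast, PySem.Int.mod_natCast, PySem.Int.floordiv_natCast]
  have hlast : ((N + W - 1) / W : Nat) = lastRN W N + 1 := by
    unfold lastRN
    rw [show N + W - 1 = (N - 1) + W by omega, Nat.add_div_right _ hW]
  rw [hlast]
  rw [show (((lastRN W N + 1 : Nat) : Int) - 1) = ((lastRN W N : Nat) : Int) by push_cast; ring]
  rw [show PySem.Int.mod ((M / W : Nat) : Int) 2 = ((M / W % 2 : Nat) : Int) from by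
    exact_mod_cast PySem.Int.mod_natCast (M / W) 2]
  rw [show PySem.Int.mod ((lastRN W N : Nat) : Int) 2 = ((lastRN W N % 2 : Nat) : Int) from by
    exact_mod_cast PySem.Int.mod_natCast (lastRN W N) 2]
  rw [show ((lastRN W N : Nat) : Int) * ((W : Nat) : Int) = ((lastRN W N * W : Nat) : Int) by
    push_cast; ring]
  have hb1 : lastRN W N * W ≤ N - 1 := Nat.div_mul_le_self _ _
  have hb2 : N - 1 < lastRN W N * W + W := by
    have h1 := Nat.div_add_mod (N - 1) W
    have h2 : (N - 1) % W < W := Nat.mod_lt _ hW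
    have h3 : W * ((N - 1) / W) = ((N - 1) / W) * W := Nat.mul_comm _ _
    unfold lastRN
    omega
  have hrlast : M / W ≤ lastRN W N := Nat.div_le_div_right (by omega)
  have hmw : M % W < W := Nat.mod_lt _ hW
  simp only [beq_iff_eq]
  unfold KN topN idxN colN
  split_ifs <;> omega

-- the initial grid of zeros is arrSpec at time 0
lemma arr0_eq (W : Nat) (L : Int) :
    (PySem.List.pyRange 0 L 1).map
      (fun _ => (PySem.List.pyRange 0 ((W : Nat) : Int) 1).map (fun _ => (0 : Int)))
    = arrSpec W L.toNat 0 := by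
  unfold arrSpec rowSpec
  rw [PySem.List.pyRange_one 0 L, PySem.List.pyRange_one 0 ((W : Nat) : Int)]
  simp [List.map_map, valN]

theorem solution_spec : Claim_equal_solution := by
  unfold Claim_equal_solution
  intro n w num _ hPre
  unfold Spec_solution
  rcases hPre with hw | ⟨hw, hn⟩
  · -- w ≥ 1
    obtain ⟨W, rfl⟩ : ∃ W : Nat, w = (W : Int) := ⟨w.toNat, by omega⟩
    have hW : 0 < W := by exact_mod_cast hw
    by_cases hn1 : 1 ≤ n
    · -- the grid really holds boxes 1..n
      obtain ⟨N, rfl⟩ : ∃ N : Nat, n = (N : Int) := ⟨n.toNat, by omega⟩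
      have hN1 : 1 ≤ N := by exact_mod_cast hn1
      simp only [solution]
      rw [show PySem.Int.floordiv ((N : Nat) : Int) ((W : Nat) : Int) + 1
          = ((N / W + 1 : Nat) : Int) by rw [PySem.Int.floordiv_natCast]; push_cast; ring]
      rw [show ((List.map (fun _ => (List.map (fun _ => (0 : Int))
            (PySem.List.pyRange 0 ((W : Nat) : Int) 1)).toArray)
            (PySem.List.pyRange 0 ((N / W + 1 : Nat) : Int) 1)).toArray)
          = gArr (arrSpec W (N / W + 1) 0) by
        have h := arr0_eq W ((N / W + 1 : Nat) : Int)
        simp only [Int.toNat_natCast] at h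
        rw [← h]
        simp [gArr]]
      have hloop := loop_inv (w := ((W : Nat) : Int)) (by exact_mod_cast hW)
        (N := N) (R := N / W + 1) (by simp only [Int.toNat_natCast]; omega) N le_rfl
      simp only [Int.toNat_natCast] at hloop
      have harr : (List.foldl (solutionStep ((W : Nat) : Int))
          ((0, 0, 0), gArr (arrSpec W (N / W + 1) 0)) (PySem.List.pyRange 0 ((N : Nat) : Int) 1)).2
          = gArr (arrSpec W (N / W + 1) N) := by
        rw [foldl_gA, hloop]
      simp only [harr, pvGet2A_g, size_g, arrSpec_length]
      by_cases hv : 1 ≤ num ∧ num ≤ (N : Int)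
      · obtain ⟨M, rfl⟩ : ∃ M : Nat, num = ((M : Int)) + 1 := ⟨(num - 1).toNat, by omega⟩
        have hMN : M < N := by omega
        exact (phase2_valid hW hMN rfl).trans (alt_valid hW hMN).symm
      · refine (phase2_zero hW num ((N : Nat) : Int) ?_ (Or.inl (by omega))).trans
          (alt_invalid _ _ _ ?_).symm <;> omega
    · -- n ≤ 0 : the building loop is empty, the grid stays all zeros
      simp only [solution]
      rw [PySem.List.pyRange_one_eq_nil (show n ≤ 0 by omega)]
      simp only [List.foldl_nil]
      rw [show ((List.map (fun _ => (List.map (fun _ => (0 : Int))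
            (PySem.List.pyRange 0 ((W : Nat) : Int) 1)).toArray)
            (PySem.List.pyRange 0 (PySem.Int.floordiv n ((W : Nat) : Int) + 1) 1)).toArray)
          = gArr (arrSpec W (PySem.Int.floordiv n ((W : Nat) : Int) + 1).toNat 0) by
        rw [← arr0_eq W (PySem.Int.floordiv n ((W : Nat) : Int) + 1)]
        simp [gArr]]
      simp only [pvGet2A_g, size_g, arrSpec_length]
      refine (phase2_zero hW num n ?_ (Or.inr rfl)).trans
        (alt_invalid _ _ _ ?_).symm <;> omega
  · -- w ≤ -1 and n ≤ 0 : empty rows, nothing is ever found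
    simp only [solution]
    rw [PySem.List.pyRange_one_eq_nil (show n ≤ 0 by omega)]
    rw [PySem.List.pyRange_one_eq_nil (show w ≤ 0 by omega)]
    simp only [List.foldl_nil, List.find?_nil]
    rw [List.foldl_fixed]
    exact (alt_invalid n w num (by omega)).symm
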